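-- pv_equiv track=rewrite | github.com/Dognet-Technologies/application_traceroute | BurpExtension/waf_bypass_burp_intrud.py | applyConfusables
-- ===== SOURCE A (Python) =====
-- def applyConfusables(payload):
--     # Sostituisci con caratteri simili
--     replacements = {
--         'a': '\u03b1',  # Greek alpha
--         'e': '\u0435',  # Cyrillic e
--         'o': '\u043e',  # Cyrillic o
--     }
--     result = payload
--     for char, replacement in replacements.items():
--         result = result.replace(char, replacement)
--     return result
-- ===== SOURCE B (Python) =====
-- def applyConfusables(payload):
--     # Single pass with an explicit if/elif chain and an accumulator,
--     # instead of three whole-string replace passes over a dict.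
--     out = []
--     for c in payload:
--         if c == 'a':
--             out.append('\u03b1')
--         elif c == 'e':
--             out.append('\u0435')
--         elif c == 'o':
--             out.append('\u043e')
--         else:
--             out.append(c)
--     return ''.join(out)
-- ===== Notes on version B (the rewrite author's own statement) =====
-- stated objective: simpler
-- what changed: One pass over the characters with an if/elif chain appending into an accumulator and a single join, replacing the replacement dict and the three successive whole-string replace passes entirely.
import Mathlib
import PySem

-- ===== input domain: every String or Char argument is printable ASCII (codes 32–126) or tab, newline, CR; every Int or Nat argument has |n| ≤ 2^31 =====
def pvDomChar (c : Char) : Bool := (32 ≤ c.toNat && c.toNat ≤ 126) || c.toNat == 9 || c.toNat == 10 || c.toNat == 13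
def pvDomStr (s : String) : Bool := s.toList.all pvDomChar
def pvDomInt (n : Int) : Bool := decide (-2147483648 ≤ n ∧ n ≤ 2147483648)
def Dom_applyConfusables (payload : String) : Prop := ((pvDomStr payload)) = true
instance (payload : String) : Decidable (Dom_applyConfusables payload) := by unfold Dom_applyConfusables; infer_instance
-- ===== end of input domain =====

-- ===== PORT A =====
-- B replaces A's dict of three whole-string replace passes by one pass over the
-- characters with an if/elif chain into an accumulator (objective: simpler).
def applyConfusables (payload : String) : String :=
  let replacements : List (String × String) :=
    [("a", "\u03b1"), ("e", "\u0435"), ("o", "\u043e")]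
  replacements.foldl (fun result p => PySem.Str.replace result p.1 p.2) payload

-- ===== PORT B =====
def applyConfusables_alt (payload : String) : String :=
  String.ofList
    (payload.toList.foldl
      (fun out c =>
        if c = 'a' then out ++ ['\u03b1']
        else if c = 'e' then out ++ ['\u0435']
        else if c = 'o' then out ++ ['\u043e']
        else out ++ [c])
      [])

-- ===== PRECONDITION & SPEC =====
def Spec_applyConfusables (payload : String) (out : String) : Prop := out = applyConfusables_alt payload
instance (payload : String) (out : String) : Decidable (Spec_applyConfusables payload out) := by unfold Spec_applyConfusables; infer_instance

-- ===== CLAIM (what is proved, stated in full; the proofs are below) =====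
def Claim_equal_applyConfusables : Prop := ∀ (payload : String), Dom_applyConfusables payload → Spec_applyConfusables payload (applyConfusables payload)

-- ===== LEMMAS AND PROOFS =====

-- single-character replace is a pointwise map
theorem replace_go_single (a r : Char) (l acc : List Char) (fuel : Nat)
    (h : l.length ≤ fuel) :
    PySem.Chars.replace.go [a] [r] fuel l acc =
      acc.reverse ++ l.map (fun c => if c = a then r else c) := by
  induction l generalizing fuel acc with
  | nil => cases fuel <;> simp [PySem.Chars.replace.go]
  | cons c t ih =>
    cases fuel with
    | zero => simp at h
    | succ fuel =>
      simp only [List.length_cons, Nat.succ_le_succ_iff] at h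
      by_cases hc : a = c
      · subst hc
        rw [show PySem.Chars.replace.go [a] [r] (fuel+1) (a :: t) acc =
              PySem.Chars.replace.go [a] [r] fuel t ([r].reverse ++ acc) by
            simp [PySem.Chars.replace.go, List.isPrefixOf]]
        rw [ih _ _ h]
        simp
      · rw [show PySem.Chars.replace.go [a] [r] (fuel+1) (c :: t) acc =
              PySem.Chars.replace.go [a] [r] fuel t (c :: acc) by
            simp [PySem.Chars.replace.go, List.isPrefixOf, hc]]
        rw [ih _ _ h]
        simp [Ne.symm hc]

theorem replace_single (s : List Char) (a r : Char) :
    PySem.Chars.replace s [a] [r] = s.map (fun c => if c = a then r else c) := by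
  simp [PySem.Chars.replace, replace_go_single a r s [] s.length (le_refl _)]

-- B's accumulator loop is a pointwise map
theorem alt_foldl_eq_map (l acc : List Char) :
    (l.foldl
      (fun out c =>
        if c = 'a' then out ++ ['\u03b1']
        else if c = 'e' then out ++ ['\u0435']
        else if c = 'o' then out ++ ['\u043e']
        else out ++ [c])
      acc) =
      acc ++ l.map (fun c =>
        if c = 'a' then '\u03b1'
        else if c = 'e' then '\u0435'
        else if c = 'o' then '\u043e'
        else c) := by
  induction l generalizing acc with
  | nil => simp
  | cons c t ih =>
    simp only [List.foldl, List.map]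
    split_ifs <;> rw [ih] <;> simp

-- ===== VERDICT (by name: the statement is the Claim_ definition above) =====
theorem applyConfusables_spec : Claim_equal_applyConfusables := by
  intro payload _
  unfold Spec_applyConfusables applyConfusables applyConfusables_alt
  apply String.toList_inj.mp
  simp only [List.foldl, PySem.Str.replace]
  simp only [show ("a" : String).toList = ['a'] from by decide,
    show ("e" : String).toList = ['e'] from by decide,
    show ("o" : String).toList = ['o'] from by decide,
    show ("\u03b1" : String).toList = ['\u03b1'] from by decide,
    show ("\u0435" : String).toList = ['\u0435'] from by decide,
    show ("\u043e" : String).toList = ['\u043e'] from by decide,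
    replace_single, String.toList_ofList, alt_foldl_eq_map, List.map_map]
  apply List.map_congr_left
  intro c _
  simp only [Function.comp_def]
  by_cases ha : c = 'a'
  · subst ha; decide
  · by_cases he : c = 'e'
    · subst he; decide
    · by_cases ho : c = 'o'
      · subst ho; decide
      · simp [ha, he, ho]
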